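-- pv_equiv track=rewrite | github.com/Tiffany0410/Compiler_Optimization | examples/dataflow/dataflow.py | cprop_merge
-- ===== SOURCE A (Python) =====
-- def cprop_merge(dicts):
--     """
--     Merge function for cprop.
--     For the same variable, if the values are the same -> keep it; if different -> value = '?'.
--     """
--     out = {}
--
--     for d in dicts:
--         for var, value in d.items():
--             if var in out:
--                 out[var] = value if out[var] == value else '?'
--             else:
--                 out[var] = value
--
--     return out
-- ===== SOURCE B (Python) =====
-- def cprop_merge(dicts):
--     # Two-pass decomposition: first group every value seen per variable
--     # (first-encounter key order), then emit the value if all agree, else '?'.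
--     groups = {}
--     for d in dicts:
--         for var, value in d.items():
--             groups.setdefault(var, []).append(value)
--     out = {}
--     for var, vals in groups.items():
--         out[var] = vals[0] if all(v == vals[0] for v in vals) else '?'
--     return out
-- ===== Notes on version B (the rewrite author's own statement) =====
-- stated objective: alternative
-- what changed: Single conditional-update merge loop replaced by a two-pass scheme: first build a grouping dict var -> list of all values seen, then emit vals[0] when all values agree and '?' otherwise.
import Mathlib
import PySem

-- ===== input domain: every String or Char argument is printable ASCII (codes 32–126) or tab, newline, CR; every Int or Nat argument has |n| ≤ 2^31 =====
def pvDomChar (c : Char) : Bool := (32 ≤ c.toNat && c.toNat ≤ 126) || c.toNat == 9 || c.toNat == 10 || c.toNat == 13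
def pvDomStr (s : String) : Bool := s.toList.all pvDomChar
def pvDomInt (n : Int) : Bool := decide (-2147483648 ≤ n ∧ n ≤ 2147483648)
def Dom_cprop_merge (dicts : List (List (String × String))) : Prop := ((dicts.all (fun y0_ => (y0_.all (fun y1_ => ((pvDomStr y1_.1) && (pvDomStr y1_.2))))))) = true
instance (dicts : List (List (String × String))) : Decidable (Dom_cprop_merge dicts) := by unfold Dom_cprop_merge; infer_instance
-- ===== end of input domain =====

-- B replaces A's conditional-update merge loop by a two-pass scheme (group all values per
-- variable, then decide each variable once); same cost, alternative decomposition.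


-- ===== PORT A =====
-- out = {}; for d in dicts: for var, value in d.items(): …; return out
def cprop_merge (dicts : List (List (String × String))) : List (String × String) :=
  (dicts.foldl (fun out d =>
      (PySem.Dict.ofList d).items.foldl (fun out p =>
        if out.contains p.1 then
          out.insert p.1 (if out.getD p.1 "" == p.2 then p.2 else "?")
        else
          out.insert p.1 p.2) out)
    PySem.Dict.empty).items

-- ===== PORT B =====
-- groups = {}; …setdefault(var, []).append(value)…; then out[var] = vals[0] if all equal else '?'
def cprop_merge_alt (dicts : List (List (String × String))) : List (String × String) :=
  let groups : PySem.Dict String (List String) :=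
    dicts.foldl (fun g d =>
      (PySem.Dict.ofList d).items.foldl (fun g p =>
        g.modify p.1 [] (fun vs => vs ++ [p.2])) g)
      PySem.Dict.empty
  (groups.items.foldl (fun out q =>
      out.insert q.1 (if q.2.all (fun v => v == q.2.headD "?") then q.2.headD "?" else "?"))
    PySem.Dict.empty).items

-- ===== PRECONDITION & SPEC =====
def Spec_cprop_merge (dicts : List (List (String × String))) (out : List (String × String)) : Prop := out = cprop_merge_alt dicts
instance (dicts : List (List (String × String))) (out : List (String × String)) : Decidable (Spec_cprop_merge dicts out) := by unfold Spec_cprop_merge; infer_instance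

-- ===== CLAIM (what is proved, stated in full; the proofs are below) =====
def Claim_equal_cprop_merge : Prop := ∀ (dicts : List (List (String × String))), Dom_cprop_merge dicts → Spec_cprop_merge dicts (cprop_merge dicts)

-- ===== LEMMAS AND PROOFS =====

-- the flattened stream of (var, value) pairs both programs traverse
def pvFlat (dicts : List (List (String × String))) : List (String × String) :=
  (dicts.map (fun d => (PySem.Dict.ofList d).items)).flatten

-- A's loop body, written as a single insert
def pvStepA (out : PySem.Dict String String) (p : String × String) : PySem.Dict String String :=
  out.insert p.1 (if out.contains p.1 then (if out.getD p.1 "" == p.2 then p.2 else "?") else p.2)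

-- A's running merge of a value stream
def pvMergeFrom (w : String) (vs : List String) : String :=
  vs.foldl (fun acc v => if acc == v then v else "?") w

lemma pvStepA_eq (out : PySem.Dict String String) (p : String × String) :
    (if out.contains p.1 then
        out.insert p.1 (if out.getD p.1 "" == p.2 then p.2 else "?")
      else
        out.insert p.1 p.2) = pvStepA out p := by
  unfold pvStepA; by_cases h : out.contains p.1 <;> simp [h]

lemma pvA_flat (dicts : List (List (String × String))) :
    cprop_merge dicts = ((pvFlat dicts).foldl pvStepA PySem.Dict.empty).items := by
  unfold cprop_merge pvFlat
  rw [List.foldl_flatten, List.foldl_map]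
  have hfun : (fun (out : PySem.Dict String String) (p : String × String) =>
      if out.contains p.1 then
        out.insert p.1 (if out.getD p.1 "" == p.2 then p.2 else "?")
      else
        out.insert p.1 p.2) = pvStepA := by
    funext out p; exact pvStepA_eq out p
  rw [hfun]

lemma pvB_flat (dicts : List (List (String × String))) :
    (dicts.foldl (fun g d =>
      (PySem.Dict.ofList d).items.foldl (fun g p =>
        g.modify p.1 [] (fun vs => vs ++ [p.2])) g)
      (PySem.Dict.empty : PySem.Dict String (List String)))
    = (pvFlat dicts).foldl (fun g p => g.modify p.1 [] (fun vs => vs ++ [p.2])) PySem.Dict.empty := by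
  unfold pvFlat
  rw [List.foldl_flatten, List.foldl_map]

-- A's get? after folding a pair stream
lemma pvA_get? (l : List (String × String)) (out : PySem.Dict String String) (k : String) :
    (l.foldl pvStepA out).get? k =
      match out.get? k with
      | some w => some (pvMergeFrom w ((l.filter (fun p => p.1 == k)).map (fun p => p.2)))
      | none =>
        match (l.filter (fun p => p.1 == k)).map (fun p => p.2) with
        | [] => none
        | v :: vs => some (pvMergeFrom v vs) := by
  induction l generalizing out with
  | nil => cases h : out.get? k <;> simp [h, pvMergeFrom]
  | cons p l ih =>
    simp only [List.foldl_cons, ih]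
    by_cases hk : p.1 = k
    · subst hk
      have hins : (pvStepA out p).get? p.1 =
        some (if out.contains p.1 then (if out.getD p.1 "" == p.2 then p.2 else "?") else p.2) := by
        unfold pvStepA
        rw [PySem.Dict.get?_insert]
        simp
      rw [hins]
      cases h : out.get? p.1 with
      | some w =>
        have hc : out.contains p.1 = true := by
          rw [PySem.Dict.contains_eq_isSome_get?, h]; rfl
        have hg : out.getD p.1 "" = w :=
          PySem.Dict.getD_of_get?_eq_some out "" h
        simp [hc, hg, pvMergeFrom]
      | none =>
        have hc : out.contains p.1 = false := by
          rw [PySem.Dict.contains_eq_isSome_get?, h]; rfl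
        simp [hc, pvMergeFrom]
    · have hins : (pvStepA out p).get? k = out.get? k := by
        unfold pvStepA
        rw [PySem.Dict.get?_insert]
        rw [if_neg (fun hkk => hk hkk.symm)]
      rw [hins]
      have hne : (p.1 == k) = false := by simp [hk]
      simp [hne]

lemma pvMergeFrom_eq_all (vs : List String) (w : String) :
    pvMergeFrom w vs = if vs.all (fun v => v == w) then w else "?" := by
  induction vs generalizing w with
  | nil => simp [pvMergeFrom]
  | cons v vs ih =>
    by_cases h : w = v
    · subst h
      have h1 : pvMergeFrom w (w :: vs) = pvMergeFrom w vs := by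
        simp [pvMergeFrom]
      have hall : ((w :: vs).all fun v => v == w) = (vs.all fun v => v == w) := by
        simp
      rw [h1, ih w, hall]
    · have hb : (w == v) = false := by simp [h]
      have hb' : (v == w) = false := by simp [Ne.symm h]
      have h1 : pvMergeFrom w (v :: vs) = pvMergeFrom "?" vs := by
        simp [pvMergeFrom, h]
      have hall : ((v :: vs).all fun v => v == w) = false := by
        simp [hb']
      rw [h1, ih "?", hall]
      simp

-- items of a Nodup-keyed dict are keys paired with their getD values
lemma pvItems_eq_keys_map {κ ν : Type} [BEq κ] [LawfulBEq κ] (d : PySem.Dict κ ν)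
    (dflt : ν) (h : d.keys.Nodup) :
    d.items = d.keys.map (fun k => (k, d.getD k dflt)) := by
  have hk : d.keys = d.items.map (fun p => p.1) := by simp only [PySem.Dict.keys]
  apply List.ext_getElem
  · simp [hk]
  · intro i h1 h2
    have hi : d.items[i] ∈ d.items := List.getElem_mem _
    have hklen : i < d.keys.length := by simpa [hk] using h1
    have hkey : d.keys[i] = d.items[i].1 := by simp [hk]
    have hget : d.get? d.items[i].1 = some d.items[i].2 := by
      refine PySem.Dict.get?_of_mem_items d ?_ h
      simp
    have hgd : d.getD d.items[i].1 dflt = d.items[i].2 :=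
      PySem.Dict.getD_of_get?_eq_some d dflt hget
    simp [hkey, hgd]

lemma pv_main (dicts : List (List (String × String))) :
    cprop_merge dicts = cprop_merge_alt dicts := by
  unfold cprop_merge_alt
  rw [pvA_flat, pvB_flat]
  set L := pvFlat dicts with hL
  set A := L.foldl pvStepA (PySem.Dict.empty : PySem.Dict String String) with hA
  set G := L.foldl (fun g p => g.modify p.1 [] (fun vs => vs ++ [p.2]))
      (PySem.Dict.empty : PySem.Dict String (List String)) with hG
  -- keys of both accumulators
  have hGkeys : G.keys = PySem.Set.update [] (L.map (fun p => p.1)) := by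
    rw [hG]
    rw [PySem.Dict.keys_foldl_modify_key L (fun p => p.1) [] (fun _ p vs => vs ++ [p.2])
      PySem.Dict.empty]
    rw [PySem.Dict.keys_empty]
  have hGnodup : G.keys.Nodup := by
    rw [hG]
    exact PySem.Dict.nodup_keys_foldl_modify_key L (fun p => p.1) [] (fun _ p vs => vs ++ [p.2])
      PySem.Dict.empty PySem.Dict.nodup_keys_empty
  have hAkeys : A.keys = PySem.Set.update [] (L.map (fun p => p.1)) := by
    rw [hA]
    rw [show pvStepA = (fun (d : PySem.Dict String String) (p : String × String) =>
      d.insert p.1 ((fun d p => if d.contains p.1 then (if d.getD p.1 "" == p.2 then p.2 else "?") else p.2) d p)) from rfl]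
    rw [PySem.Dict.keys_foldl_insert_key L (fun p => p.1) _ PySem.Dict.empty]
    rw [PySem.Dict.keys_empty]
  have hAnodup : A.keys.Nodup := by
    rw [hA]
    rw [show pvStepA = (fun (d : PySem.Dict String String) (p : String × String) =>
      d.insert p.1 ((fun d p => if d.contains p.1 then (if d.getD p.1 "" == p.2 then p.2 else "?") else p.2) d p)) from rfl]
    exact PySem.Dict.nodup_keys_foldl_insert_key L (fun p => p.1) _
      PySem.Dict.empty PySem.Dict.nodup_keys_empty
  -- G's stored list at each key
  have hGgetD : ∀ k, G.getD k [] = (L.filter (fun p => p.1 == k)).map (fun p => p.2) := by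
    intro k
    rw [hG, PySem.Dict.getD_foldl_modify_append L PySem.Dict.empty k]
    simp [PySem.Dict.getD_empty]
  -- B's second loop over fresh distinct keys
  have hBitems : (G.items.foldl (fun out q =>
      out.insert q.1 (if q.2.all (fun v => v == q.2.headD "?") then q.2.headD "?" else "?"))
      (PySem.Dict.empty : PySem.Dict String String)).items
      = G.items.map (fun q => (q.1, if q.2.all (fun v => v == q.2.headD "?") then q.2.headD "?" else "?")) := by
    rw [PySem.Dict.items_foldl_insert_fresh G.items (fun q => q.1)
      (fun q => if q.2.all (fun v => v == q.2.headD "?") then q.2.headD "?" else "?") PySem.Dict.empty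
      (by intro a _; simp [PySem.Dict.contains_empty])
      (by rw [show G.items.map (fun q => q.1) = G.keys from by simp only [PySem.Dict.keys]]; exact hGnodup)]
    simp [show (PySem.Dict.empty : PySem.Dict String String).items = [] from rfl]
  rw [hBitems]
  rw [pvItems_eq_keys_map A "" hAnodup, pvItems_eq_keys_map G [] hGnodup]
  rw [List.map_map]
  rw [hAkeys, hGkeys]
  apply List.map_congr_left
  intro k hkmem
  have hkL : k ∈ L.map (fun p => p.1) := by
    have := (PySem.Set.mem_update ([] : PySem.Set String) (L.map (fun p => p.1)) k).mp hkmem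
    simpa using this
  -- the filtered value stream for k is nonempty
  obtain ⟨p, hp, hpk⟩ := List.mem_map.mp hkL
  have hpf : p ∈ L.filter (fun p => p.1 == k) := by
    rw [List.mem_filter]; exact ⟨hp, by simp [hpk]⟩
  have hne : (L.filter (fun p => p.1 == k)).map (fun p => p.2) ≠ [] := by
    intro hnil
    rw [List.map_eq_nil_iff] at hnil
    rw [hnil] at hpf
    exact (List.not_mem_nil).elim hpf
  obtain ⟨v, vs, hvvs⟩ := List.exists_cons_of_ne_nil hne
  have hAget : A.get? k = some (pvMergeFrom v vs) := by
    rw [hA, pvA_get? L PySem.Dict.empty k]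
    rw [PySem.Dict.get?_empty, hvvs]
  have hAgd : A.getD k "" = pvMergeFrom v vs :=
    PySem.Dict.getD_of_get?_eq_some A "" hAget
  have hGg : G.getD k [] = v :: vs := by rw [hGgetD k, hvvs]
  simp only [Function.comp, hGg, hAgd]
  rw [pvMergeFrom_eq_all vs v]
  simp [List.all_cons]

-- ===== VERDICT (by name: the statement is the Claim_ definition above) =====
theorem cprop_merge_spec : Claim_equal_cprop_merge := by
  intro dicts _
  unfold Spec_cprop_merge
  exact pv_main dicts
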